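-- pv_equiv track=rewrite | github.com/svitass/HardMoPlus-4DHumans | data_processes/freeman_motion_optimize.py | distribute_data_over_processes
-- ===== SOURCE A (Python) =====
-- def distribute_data_over_processes(motion_list, num_processes):
--     avg = len(motion_list) // num_processes
--     remainder = len(motion_list) % num_processes
--
--     subsets = []
--     start_idx = 0
--     for _ in range(num_processes):
--         subset_size = avg + (1 if remainder > 0 else 0)
--         subset = motion_list[start_idx : start_idx + subset_size]
--         subsets.append(subset)
--         start_idx += subset_size
--         remainder -= 1
--     return subsets
-- ===== SOURCE B (Python) =====
-- def distribute_data_over_processes(motion_list, num_processes):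
--     avg, remainder = divmod(len(motion_list), num_processes)
--     def bound(i):
--         return i * avg + min(i, remainder)
--     return [motion_list[bound(i):bound(i + 1)] for i in range(num_processes)]
-- ===== Notes on version B (the rewrite author's own statement) =====
-- stated objective: simpler
-- what changed: Replaces the stateful loop threading start_idx and a decremented remainder with a closed-form chunk boundary bound(i) = i*avg + min(i, remainder) and a comprehension of independent slices.
import Mathlib
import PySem

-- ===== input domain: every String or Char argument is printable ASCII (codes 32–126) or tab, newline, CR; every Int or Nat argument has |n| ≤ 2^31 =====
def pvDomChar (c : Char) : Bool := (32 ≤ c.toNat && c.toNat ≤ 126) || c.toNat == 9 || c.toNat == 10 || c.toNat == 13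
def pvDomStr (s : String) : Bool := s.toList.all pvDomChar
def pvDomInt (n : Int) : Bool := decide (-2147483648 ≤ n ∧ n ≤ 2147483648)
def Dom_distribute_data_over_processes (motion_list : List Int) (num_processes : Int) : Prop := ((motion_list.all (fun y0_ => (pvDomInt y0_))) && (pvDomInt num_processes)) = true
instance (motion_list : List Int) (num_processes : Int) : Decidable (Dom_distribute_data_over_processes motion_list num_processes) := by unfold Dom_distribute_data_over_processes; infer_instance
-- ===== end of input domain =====

-- B replaces the running start_idx/remainder accumulator with closed-form chunk
-- boundaries i*avg + min(i, remainder); equal return values on Pre_ (num_processes ≠ 0).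

-- ===== PORT A =====
def distribute_data_over_processes (motion_list : List Int) (num_processes : Int) : List (List Int) :=
  let avg := PySem.Int.floordiv (motion_list.length : Int) num_processes
  let remainder := PySem.Int.mod (motion_list.length : Int) num_processes
  let st := (PySem.List.pyRange 0 num_processes 1).foldl
    (fun (st : List (List Int) × Int × Int) _ =>
      let subset_size := avg + (if st.2.2 > 0 then 1 else 0)
      let subset := PySem.List.slice motion_list (some st.2.1) (some (st.2.1 + subset_size))
      (st.1 ++ [subset], st.2.1 + subset_size, st.2.2 - 1))
    ([], 0, remainder)
  st.1

-- ===== PORT B =====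
def distribute_data_over_processes_alt (motion_list : List Int) (num_processes : Int) : List (List Int) :=
  let avg := PySem.Int.floordiv (motion_list.length : Int) num_processes
  let remainder := PySem.Int.mod (motion_list.length : Int) num_processes
  let bound := fun (i : Int) => i * avg + min i remainder
  (PySem.List.pyRange 0 num_processes 1).map
    (fun i => PySem.List.slice motion_list (some (bound i)) (some (bound (i + 1))))

-- ===== PRECONDITION & SPEC =====
-- A raises ZeroDivisionError when num_processes = 0; excluded.
def Pre_distribute_data_over_processes (motion_list : List Int) (num_processes : Int) : Prop := num_processes ≠ 0
instance (motion_list : List Int) (num_processes : Int) : Decidable (Pre_distribute_data_over_processes motion_list num_processes) := by unfold Pre_distribute_data_over_processes; infer_instance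
def pvWitness_distribute_data_over_processes : List Int × Int := ([1, 2, 3, 4, 5], 3)
def Spec_distribute_data_over_processes (motion_list : List Int) (num_processes : Int) (out : List (List Int)) : Prop := out = distribute_data_over_processes_alt motion_list num_processes
instance (motion_list : List Int) (num_processes : Int) (out : List (List Int)) : Decidable (Spec_distribute_data_over_processes motion_list num_processes out) := by unfold Spec_distribute_data_over_processes; infer_instance

-- ===== CLAIM (what is proved, stated in full; the proofs are below) =====
def Claim_equal_distribute_data_over_processes : Prop := ∀ (motion_list : List Int) (num_processes : Int), Dom_distribute_data_over_processes motion_list num_processes → Pre_distribute_data_over_processes motion_list num_processes → Spec_distribute_data_over_processes motion_list num_processes (distribute_data_over_processes motion_list num_processes)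

-- ===== LEMMAS AND PROOFS =====

-- boundary step: advancing one chunk from bound i lands on bound (i+1)
theorem pv_bound_step (avg R i : Int) :
    (i * avg + min i R) + (avg + (if R - i > 0 then 1 else 0)) = (i + 1) * avg + min (i + 1) R := by
  by_cases h : R ≤ i
  · rw [if_neg (by omega : ¬ R - i > 0), min_eq_right h, min_eq_right (by omega : R ≤ i + 1)]
    ring
  · rw [if_pos (by omega : R - i > 0), min_eq_left (by omega : i ≤ R), min_eq_left (by omega : i + 1 ≤ R)]
    ring

-- loop invariant: A's fold from state (acc, bound i, R - i) produces acc ++ the closed-form slices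
theorem pv_loop_eq (M : List Int) (avg R : Int) :
    ∀ (l : List Int) (i : Int) (acc : List (List Int)),
    (l.foldl
      (fun (st : List (List Int) × Int × Int) _ =>
        let subset_size := avg + (if st.2.2 > 0 then 1 else 0)
        let subset := PySem.List.slice M (some st.2.1) (some (st.2.1 + subset_size))
        (st.1 ++ [subset], st.2.1 + subset_size, st.2.2 - 1))
      (acc, i * avg + min i R, R - i)).1
    = acc ++ (List.range l.length).map
        (fun (j : Nat) => PySem.List.slice M
          (some ((i + (j : Int)) * avg + min (i + (j : Int)) R))
          (some ((i + (j : Int) + 1) * avg + min (i + (j : Int) + 1) R))) := by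
  intro l
  induction l with
  | nil => simp
  | cons x xs ih =>
    intro i acc
    simp only [List.foldl_cons, List.length_cons]
    by_cases hc : (R - i) > 0
    · have h1 : (i * avg + min i R) + (avg + 1) = (i + 1) * avg + min (i + 1) R := by
        have := pv_bound_step avg R i
        rwa [if_pos hc] at this
      simp only [if_pos hc, h1, show R - i - 1 = R - (i + 1) from by ring]
      rw [ih (i + 1)]
      rw [List.range_succ_eq_map, List.map_cons, List.map_map]
      simp only [List.append_assoc, List.cons_append, List.nil_append]
      congr 2
      · norm_num
      apply List.map_congr_left
      intro a _
      simp only [Function.comp_apply, Nat.succ_eq_add_one]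
      push_cast
      ring_nf
    · have h1 : (i * avg + min i R) + (avg + 0) = (i + 1) * avg + min (i + 1) R := by
        have := pv_bound_step avg R i
        rwa [if_neg hc] at this
      simp only [if_neg hc, h1, show R - i - 1 = R - (i + 1) from by ring]
      rw [ih (i + 1)]
      rw [List.range_succ_eq_map, List.map_cons, List.map_map]
      simp only [List.append_assoc, List.cons_append, List.nil_append]
      congr 2
      · norm_num
      apply List.map_congr_left
      intro a _
      simp only [Function.comp_apply, Nat.succ_eq_add_one]
      push_cast
      ring_nf

-- ===== VERDICT (by name: the statement is the Claim_ definition above) =====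
theorem distribute_data_over_processes_spec : Claim_equal_distribute_data_over_processes := by
  intro M p _ _
  unfold Spec_distribute_data_over_processes distribute_data_over_processes distribute_data_over_processes_alt
  set avg := PySem.Int.floordiv (M.length : Int) p with havg
  set R := PySem.Int.mod (M.length : Int) p with hR
  by_cases hp : p ≤ 0
  · rw [PySem.List.pyRange_one_eq_nil (by omega : p ≤ 0)]
    simp
  · have hp' : 0 < p := by omega
    have hR0 : 0 ≤ R := by
      rw [hR, PySem.Int.mod_eq_emod_of_pos hp']
      exact Int.emod_nonneg _ (by omega)
    have key := pv_loop_eq M avg R (PySem.List.pyRange 0 p 1) 0 []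
    rw [zero_mul, zero_add, min_eq_left hR0, show R - 0 = R from by ring] at key
    simp only []
    rw [key]
    rw [PySem.List.pyRange_one 0 p, List.length_map, List.length_range]
    simp only [List.map_map, List.nil_append]
    apply List.map_congr_left
    intro a _
    norm_num
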